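-- pv_equiv track=rewrite | github.com/LSDOlab/GAwig | run_liberty_v2.py | generate_sub_lists
-- ===== SOURCE A (Python) =====
-- def generate_sub_lists(interaction_groups):
--     # generates sub lists for groups of full interaction with no cross-interaction
--     sub_eval_list, sub_induced_list = [], []
--     for group in interaction_groups:
--         for i in group:
--             for j in group:
--                 sub_eval_list.append(i)
--                 sub_induced_list.append(j)
--     return sub_eval_list, sub_induced_list
-- ===== SOURCE B (Python) =====
-- def generate_sub_lists(interaction_groups):
--     # same sub lists, computed by one flat loop of n*n iterations per group
--     # using index arithmetic (t // n gives the eval element, t % n the induced one)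
--     # instead of nested element loops
--     sub_eval_list, sub_induced_list = [], []
--     for group in interaction_groups:
--         n = len(group)
--         for t in range(n * n):
--             sub_eval_list.append(group[t // n])
--             sub_induced_list.append(group[t % n])
--     return sub_eval_list, sub_induced_list
-- ===== Notes on version B (the rewrite author's own statement) =====
-- stated objective: alternative
-- what changed: Replaces the nested element loops (for i in group: for j in group) with a single flat loop of n*n iterations per group that picks both elements by index arithmetic: eval element group[t // n], induced element group[t % n].
import Mathlib
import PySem

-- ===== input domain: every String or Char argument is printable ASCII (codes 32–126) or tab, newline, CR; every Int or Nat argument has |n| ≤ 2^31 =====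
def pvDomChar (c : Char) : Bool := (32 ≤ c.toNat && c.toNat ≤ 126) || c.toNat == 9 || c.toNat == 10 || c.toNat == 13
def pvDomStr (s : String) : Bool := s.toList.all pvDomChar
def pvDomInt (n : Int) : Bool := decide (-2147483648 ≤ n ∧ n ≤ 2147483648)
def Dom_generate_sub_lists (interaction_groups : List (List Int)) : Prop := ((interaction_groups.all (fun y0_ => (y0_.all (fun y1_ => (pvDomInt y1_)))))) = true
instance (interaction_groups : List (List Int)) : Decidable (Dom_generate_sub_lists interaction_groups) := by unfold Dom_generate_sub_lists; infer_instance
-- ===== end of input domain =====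

-- B replaces A's nested element loops with one flat loop of n*n iterations per group,
-- picking both elements by index arithmetic (t // n and t % n); same cost class.

-- ===== PORT A =====
-- for group: for i in group: for j in group: append i to eval, j to induced
def generate_sub_lists (interaction_groups : List (List Int)) : List Int × List Int :=
  interaction_groups.foldl
    (fun st group =>
      group.foldl
        (fun st i =>
          group.foldl (fun st j => (st.1 ++ [i], st.2 ++ [j])) st)
        st)
    ([], [])

-- ===== PORT B =====
-- for group: n = len(group); for t in range(n*n): append group[t // n], group[t % n].
-- The indices t // n and t % n are always in range (0 ≤ t < n*n), so Python never
-- raises here; pyGetD with default 0 is exact on these in-range accesses.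
def generate_sub_lists_alt (interaction_groups : List (List Int)) : List Int × List Int :=
  interaction_groups.foldl
    (fun st group =>
      let n : Int := group.length
      (PySem.List.pyRange 0 (n * n) 1).foldl
        (fun st t =>
          (st.1 ++ [PySem.List.pyGetD group (PySem.Int.floordiv t n) 0],
           st.2 ++ [PySem.List.pyGetD group (PySem.Int.mod t n) 0]))
        st)
    ([], [])

-- ===== PRECONDITION & SPEC =====
def Spec_generate_sub_lists (interaction_groups : List (List Int)) (out : List Int × List Int) : Prop := out = generate_sub_lists_alt interaction_groups
instance (interaction_groups : List (List Int)) (out : List Int × List Int) : Decidable (Spec_generate_sub_lists interaction_groups out) := by unfold Spec_generate_sub_lists; infer_instance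

-- ===== CLAIM (what is proved, stated in full; the proofs are below) =====
def Claim_equal_generate_sub_lists : Prop := ∀ (interaction_groups : List (List Int)), Dom_generate_sub_lists interaction_groups → Spec_generate_sub_lists interaction_groups (generate_sub_lists interaction_groups)

-- ===== LEMMAS AND PROOFS =====

-- A's innermost loop over g appends i once per element of g and appends g itself.
theorem gsl_inner (g : List Int) (i : Int) (st : List Int × List Int) :
    g.foldl (fun st j => (st.1 ++ [i], st.2 ++ [j])) st
      = (st.1 ++ List.replicate g.length i, st.2 ++ g) := by
  induction g generalizing st with
  | nil => simp
  | cons a t ih =>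
      simp [List.foldl_cons, ih, List.replicate_succ, List.append_assoc]

-- A's middle loop: per-element replicate for eval, tiling for induced.
theorem gsl_mid (g l : List Int) (st : List Int × List Int) :
    l.foldl (fun st i => (st.1 ++ List.replicate g.length i, st.2 ++ g)) st
      = (st.1 ++ l.flatMap (fun x => List.replicate g.length x),
         st.2 ++ (List.replicate l.length g).flatten) := by
  induction l generalizing st with
  | nil => simp
  | cons a t ih =>
      simp [List.foldl_cons, ih, List.replicate_succ]

-- A's whole per-group loop, in closed form.
theorem gsl_groupA (g : List Int) (st : List Int × List Int) :
    g.foldl (fun st i => g.foldl (fun st j => (st.1 ++ [i], st.2 ++ [j])) st) st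
      = (st.1 ++ g.flatMap (fun x => List.replicate g.length x),
         st.2 ++ (List.replicate g.length g).flatten) := by
  have h : ∀ st, g.foldl (fun st i => g.foldl (fun st j => (st.1 ++ [i], st.2 ++ [j])) st) st
      = g.foldl (fun st i => (st.1 ++ List.replicate g.length i, st.2 ++ g)) st := by
    intro st
    apply PySem.List.foldl_congr_mem
    intros
    first | rfl | exact gsl_inner _ _ _
  rw [h, gsl_mid]

-- range (r*n), traversed by f, is r blocks of n consecutive indices.
theorem range_mul_blocks {α : Type} (n : Nat) (f : Nat → α) :
    ∀ r : Nat, (List.range (r * n)).map f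
      = (List.range r).flatMap (fun i => (List.range n).map (fun j => f (i * n + j))) := by
  intro r
  induction r with
  | zero => simp
  | succ r ih =>
      rw [Nat.succ_mul, List.range_add, List.map_append, ih, List.range_succ,
        List.flatMap_append]
      simp [List.map_map, Function.comp]

-- the eval indices t // n enumerate each element n times in order
theorem mapdiv (g : List Int) :
    (List.range (g.length * g.length)).map (fun k => g.getD (k / g.length) 0)
      = g.flatMap (fun x => List.replicate g.length x) := by
  rcases Nat.eq_zero_or_pos g.length with h | h
  · simp [List.eq_nil_of_length_eq_zero h]
  · rw [range_mul_blocks]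
    have hinner : ∀ i ∈ List.range g.length,
        (List.range g.length).map (fun j => g.getD ((i * g.length + j) / g.length) 0)
          = List.replicate g.length (g.getD i 0) := by
      intro i _
      rw [List.eq_replicate_iff]
      refine ⟨by simp, ?_⟩
      intro b hb
      rcases List.mem_map.1 hb with ⟨j, hj, rfl⟩
      have hj' : j < g.length := List.mem_range.1 hj
      have hdiv : (i * g.length + j) / g.length = i := by
        rw [Nat.add_comm, Nat.mul_comm, Nat.add_mul_div_left _ _ h,
          Nat.div_eq_of_lt hj', Nat.zero_add]
      rw [hdiv]
    rw [List.flatMap_def, List.map_congr_left hinner, List.flatMap_def]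
    have hg : (List.range g.length).map (fun i => g.getD i 0) = g := by
      refine List.ext_getElem (by simp) ?_
      intro i h1 h2
      simp [List.getElem?_eq_getElem h2]
    congr 1
    calc (List.range g.length).map (fun i => List.replicate g.length (g.getD i 0))
        = ((List.range g.length).map (fun i => g.getD i 0)).map
            (List.replicate g.length) := by rw [List.map_map]; rfl
      _ = g.map (List.replicate g.length) := by rw [hg]

-- the induced indices t % n tile the group n times in order
theorem mapmod (g : List Int) :
    (List.range (g.length * g.length)).map (fun k => g.getD (k % g.length) 0)
      = (List.replicate g.length g).flatten := by
  rcases Nat.eq_zero_or_pos g.length with h | h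
  · simp [List.eq_nil_of_length_eq_zero h]
  · rw [range_mul_blocks]
    have hinner : ∀ i ∈ List.range g.length,
        (List.range g.length).map (fun j => g.getD ((i * g.length + j) % g.length) 0)
          = g := by
      intro i _
      have hmap : ∀ j ∈ List.range g.length,
          g.getD ((i * g.length + j) % g.length) 0 = g.getD j 0 := by
        intro j hj
        have hj' : j < g.length := List.mem_range.1 hj
        rw [Nat.add_comm, Nat.mul_comm, Nat.add_mul_mod_self_left, Nat.mod_eq_of_lt hj']
      rw [List.map_congr_left hmap]
      refine List.ext_getElem (by simp) ?_
      intro k k1 k2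
      simp [List.getElem?_eq_getElem k2]
    rw [List.flatMap_def, List.map_congr_left hinner]
    congr 1
    refine List.ext_getElem (by simp) ?_
    intro k k1 k2
    simp

-- B's whole per-group loop, in the same closed form as A's.
theorem gsl_groupB (g : List Int) (st : List Int × List Int) :
    (PySem.List.pyRange 0 ((g.length : Int) * (g.length : Int)) 1).foldl
      (fun st t =>
        (st.1 ++ [PySem.List.pyGetD g (PySem.Int.floordiv t (g.length : Int)) 0],
         st.2 ++ [PySem.List.pyGetD g (PySem.Int.mod t (g.length : Int)) 0])) st
      = (st.1 ++ g.flatMap (fun x => List.replicate g.length x),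
         st.2 ++ (List.replicate g.length g).flatten) := by
  obtain ⟨a, b⟩ := st
  rw [PySem.List.foldl_prod_mk
        (f := fun s t => s ++ [PySem.List.pyGetD g (PySem.Int.floordiv t (g.length : Int)) 0])
        (g := fun s t => s ++ [PySem.List.pyGetD g (PySem.Int.mod t (g.length : Int)) 0]),
      PySem.List.foldl_append_singleton_eq_map, PySem.List.foldl_append_singleton_eq_map]
  have hcast : ((g.length : Int) * (g.length : Int)) = ((g.length * g.length : Nat) : Int) := by
    push_cast; ring
  rw [hcast, PySem.List.pyRange_zero_natCast]
  simp only [List.map_map, Function.comp_def, PySem.Int.floordiv_natCast,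
    PySem.Int.mod_natCast, PySem.List.pyGetD_natCast]
  rw [mapdiv, mapmod]

-- ===== VERDICT (by name: the statement is the Claim_ definition above) =====
theorem generate_sub_lists_spec : Claim_equal_generate_sub_lists := by
  intro gs _
  unfold Spec_generate_sub_lists generate_sub_lists generate_sub_lists_alt
  induction gs using List.reverseRecOn with
  | nil => rfl
  | append_singleton t g ih =>
      simp only [List.foldl_append, gsl_groupA, gsl_groupB]
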